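-- pv_equiv track=rewrite | github.com/chrislowzhengxi/cloudsky-app | automoderator.py | contains_banned_content
-- ===== SOURCE A (Python) =====
-- from typing import Dict, List, Tuple, Optional
--
-- def contains_banned_content(text: str, banlist: List[str]) -> Tuple[bool, Optional[str]]:
--     """
--     Check if text contains any banned words/phrases.
--
--     Args:
--         text: Text content to check
--         banlist: List of banned words/phrases
--
--     Returns:
--         Tuple of (is_banned, reason_string)
--     """
--     if not text:
--         return False, None
--
--     text_lower = text.lower()
--     for banned_term in banlist:
--         if banned_term.lower() in text_lower:
--             return True, f"Contains banned word/phrase: '{banned_term}'"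
--
--     return False, None
-- ===== SOURCE B (Python) =====
-- from typing import List, Tuple, Optional
--
-- def contains_banned_content(text: str, banlist: List[str]) -> Tuple[bool, Optional[str]]:
--     """Text-major scan: walk the text once, and at each position only test the
--     banned terms with index below the best match found so far (the inner bound
--     shrinks as matches are found), instead of one full substring search per term."""
--     low = text.lower()
--     terms = [t.lower() for t in banlist]
--     best = len(terms)
--     for i in range(len(low)):
--         for j in range(best):
--             if low.startswith(terms[j], i):
--                 best = j
--                 break
--     if best < len(banlist):
--         return True, f"Contains banned word/phrase: '{banlist[best]}'"
--     return False, None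
-- ===== Notes on version B (the rewrite author's own statement) =====
-- stated objective: alternative
-- what changed: B replaces A's banlist-major loop of full-text substring searches ('in' once per term) by a single text-major scan that at each position tests only the terms below the best banlist index found so far (inner bound shrinks, break on match), then reports the minimal-index match.
import Mathlib
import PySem

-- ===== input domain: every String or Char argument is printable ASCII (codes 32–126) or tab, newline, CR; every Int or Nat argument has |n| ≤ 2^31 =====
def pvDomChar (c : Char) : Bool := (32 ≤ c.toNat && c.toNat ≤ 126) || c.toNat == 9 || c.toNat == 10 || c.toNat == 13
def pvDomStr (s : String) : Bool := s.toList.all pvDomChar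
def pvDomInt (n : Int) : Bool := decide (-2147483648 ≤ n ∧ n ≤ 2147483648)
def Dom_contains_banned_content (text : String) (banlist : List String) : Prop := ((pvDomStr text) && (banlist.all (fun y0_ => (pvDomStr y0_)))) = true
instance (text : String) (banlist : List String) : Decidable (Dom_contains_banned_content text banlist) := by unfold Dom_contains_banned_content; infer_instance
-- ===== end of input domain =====

-- B is an alternative implementation: one text-major scan tracking the minimal banlist index
-- whose term matches, instead of one full substring search per banned term (A).

-- ===== PORT A =====
-- the f-string "Contains banned word/phrase: '{t}'"
def pvMsg (t : String) : String := "Contains banned word/phrase: '" ++ t ++ "'"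

-- A's for-loop over banlist: first term whose lowercase form is a substring wins
def pvALoop (low : List Char) : List String → Bool × Option String
  | [] => (false, none)
  | t :: rest =>
    if PySem.Chars.isIn (PySem.Chars.lower t.toList) low then
      (true, some (pvMsg t))
    else pvALoop low rest

def contains_banned_content (text : String) (banlist : List String) : Bool × Option String :=
  if text.toList = [] then (false, none)        -- `if not text`
  else pvALoop (PySem.Chars.lower text.toList) banlist

-- ===== PORT B =====
-- low.startswith(terms[j], i)  — exact for 0 ≤ i (the loop only produces i ∈ range(len(low)));
-- j < terms.length always holds at call sites, so terms[j] is ported as getD.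
def pvMatchAt (low : List Char) (terms : List (List Char)) (i j : Nat) : Bool :=
  PySem.Chars.startswith (low.drop i) (terms.getD j [])

-- `for j in range(best): if low.startswith(terms[j], i): best = j; break`
-- counting form: k is the current j, fuel the remaining iterations (k + fuel = best)
def pvInner (low : List Char) (terms : List (List Char)) (i : Nat) : Nat → Nat → Nat
  | 0, k => k
  | fuel + 1, k => if pvMatchAt low terms i k then k else pvInner low terms i fuel (k + 1)

-- `for i in range(len(low)): best = <inner loop>`
def pvOuter (low : List Char) (terms : List (List Char)) : List Nat → Nat → Nat
  | [], best => best
  | i :: is, best => pvOuter low terms is (pvInner low terms i best 0)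

def contains_banned_content_alt (text : String) (banlist : List String) : Bool × Option String :=
  let low := PySem.Chars.lower text.toList
  let terms := banlist.map (fun t => PySem.Chars.lower t.toList)
  let best := pvOuter low terms (List.range low.length) terms.length
  if h : best < banlist.length then
    (true, some (pvMsg banlist[best]))
  else
    (false, none)

-- ===== PRECONDITION & SPEC =====
def Spec_contains_banned_content (text : String) (banlist : List String) (out : Bool × Option String) : Prop := out = contains_banned_content_alt text banlist
instance (text : String) (banlist : List String) (out : Bool × Option String) : Decidable (Spec_contains_banned_content text banlist out) := by unfold Spec_contains_banned_content; infer_instance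

-- ===== CLAIM (what is proved, stated in full; the proofs are below) =====
def Claim_equal_contains_banned_content : Prop := ∀ (text : String) (banlist : List String), Dom_contains_banned_content text banlist → Spec_contains_banned_content text banlist (contains_banned_content text banlist)

-- ===== LEMMAS AND PROOFS =====

-- inner loop invariant: result r satisfies k ≤ r ≤ k + fuel, r matches unless the loop was
-- exhausted, and nothing in [k, r) matches
theorem pvInner_invariant (low : List Char) (terms : List (List Char)) (i : Nat) :
    ∀ fuel k, k ≤ pvInner low terms i fuel k ∧ pvInner low terms i fuel k ≤ k + fuel ∧
      (pvInner low terms i fuel k < k + fuel → pvMatchAt low terms i (pvInner low terms i fuel k) = true) ∧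
      (∀ j, k ≤ j → j < pvInner low terms i fuel k → pvMatchAt low terms i j = false) := by
  intro fuel
  induction fuel with
  | zero => intro k; simp [pvInner]; omega
  | succ fuel ih =>
    intro k
    by_cases h : pvMatchAt low terms i k = true
    · simp [pvInner, h]; omega
    · have h' : pvMatchAt low terms i k = false := by
        cases hb : pvMatchAt low terms i k <;> simp_all
      obtain ⟨h1, h2, h3, h4⟩ := ih (k + 1)
      have hred : pvInner low terms i (fuel + 1) k = pvInner low terms i fuel (k + 1) := by
        simp [pvInner, h']
      refine ⟨?_, ?_, ?_, ?_⟩ <;> rw [hred]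
      · omega
      · omega
      · intro hlt; exact h3 (by omega)
      · intro j hkj hjlt
        rcases Nat.eq_or_lt_of_le hkj with rfl | hgt
        · exact h'
        · exact h4 j hgt hjlt

-- outer loop invariant: the result R is ≤ the initial bound, matches at some processed
-- position unless R is the bound, and no smaller index matches at any processed position
theorem pvOuter_invariant (low : List Char) (terms : List (List Char)) :
    ∀ (is : List Nat) (b : Nat), pvOuter low terms is b ≤ b ∧
      (pvOuter low terms is b < b → ∃ i ∈ is, pvMatchAt low terms i (pvOuter low terms is b) = true) ∧
      (∀ j, j < pvOuter low terms is b → ∀ i ∈ is, pvMatchAt low terms i j = false) := by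
  intro is
  induction is with
  | nil => intro b; simp [pvOuter]
  | cons i is ih =>
    intro b
    obtain ⟨g1, g2, g3, g4⟩ := pvInner_invariant low terms i b 0
    obtain ⟨h1, h2, h3⟩ := ih (pvInner low terms i b 0)
    set b' := pvInner low terms i b 0 with hb'
    set R := pvOuter low terms is b' with hR
    have hRdef : pvOuter low terms (i :: is) b = R := by simp [pvOuter, ← hb', ← hR]
    refine ⟨?_, ?_, ?_⟩ <;> rw [hRdef]
    · omega
    · intro hRb
      rcases Nat.lt_or_ge R b' with hlt | hge
      · obtain ⟨i', hi', hm⟩ := h2 hlt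
        exact ⟨i', by simp [hi'], hm⟩
      · have : R = b' := by omega
        refine ⟨i, by simp, ?_⟩
        rw [this]; exact g3 (by omega)
    · intro j hj i' hi'
      simp only [List.mem_cons] at hi'
      rcases hi' with rfl | hmem
      · exact g4 j (Nat.zero_le j) (by omega)
      · exact h3 j hj i' hmem

-- substring occurrence ↔ some in-range position matches (needs low ≠ [] for the empty term)
theorem pvIsIn_iff (low t : List Char) (hne : low ≠ []) :
    PySem.Chars.isIn t low = true ↔ ∃ i, i < low.length ∧ PySem.Chars.startswith (low.drop i) t = true := by
  constructor
  · intro h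
    obtain ⟨i, hi⟩ := (PySem.Chars.exists_prefix_drop_iff_isIn t low).2 h
    by_cases ht : t = []
    · exact ⟨0, by cases low with | nil => exact absurd rfl hne | cons a l => simp,
        by simp [ht, PySem.Chars.startswith_iff]⟩
    · refine ⟨i, ?_, (PySem.Chars.startswith_iff _ _).2 hi⟩
      by_contra hge
      have : low.drop i = [] := List.drop_eq_nil_of_le (by omega)
      rw [this] at hi
      exact ht (List.prefix_nil.1 hi)
  · rintro ⟨i, _, hm⟩
    exact (PySem.Chars.exists_prefix_drop_iff_isIn t low).1 ⟨i, (PySem.Chars.startswith_iff _ _).1 hm⟩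

-- pvMatchAt in terms of the original banlist entry
theorem pvMatchAt_eq (low : List Char) (banlist : List String) (i j : Nat) (hj : j < banlist.length) :
    pvMatchAt low (banlist.map (fun t => PySem.Chars.lower t.toList)) i j =
      PySem.Chars.startswith (low.drop i) (PySem.Chars.lower banlist[j].toList) := by
  simp [pvMatchAt, List.getD_eq_getElem?_getD, hj]

-- A's loop when no term occurs
theorem pvALoop_none (low : List Char) :
    ∀ bl : List String, (∀ t ∈ bl, PySem.Chars.isIn (PySem.Chars.lower t.toList) low = false) →
      pvALoop low bl = (false, none) := by
  intro bl
  induction bl with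
  | nil => intro _; rfl
  | cons t rest ih =>
    intro h
    have := h t (by simp)
    simp [pvALoop, this]
    exact ih fun t' ht' => h t' (by simp [ht'])

-- A's loop when the first occurring term has index j
theorem pvALoop_found (low : List Char) :
    ∀ (bl : List String) (j : Nat) (hj : j < bl.length),
      PySem.Chars.isIn (PySem.Chars.lower bl[j].toList) low = true →
      (∀ k, (hk : k < j) → PySem.Chars.isIn (PySem.Chars.lower (bl[k]'(by omega)).toList) low = false) →
      pvALoop low bl = (true, some (pvMsg bl[j])) := by
  intro bl
  induction bl with
  | nil => intro j hj; simp at hj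
  | cons t rest ih =>
    intro j hj hmatch hmin
    cases j with
    | zero => simp_all [pvALoop]
    | succ j' =>
      have h0 : PySem.Chars.isIn (PySem.Chars.lower t.toList) low = false := hmin 0 (Nat.succ_pos j')
      simp only [pvALoop, h0, Bool.false_eq_true, if_false]
      have := ih j' (by simpa using hj) (by simpa using hmatch)
        (fun k hk => by simpa using hmin (k + 1) (by omega))
      simpa using this

-- ===== VERDICT (by name: the statement is the Claim_ definition above) =====
-- the two programs agree on every input
theorem pvMain (text : String) (banlist : List String) :
    contains_banned_content text banlist = contains_banned_content_alt text banlist := by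
  set low := PySem.Chars.lower text.toList with hlowdef
  set terms := banlist.map (fun t => PySem.Chars.lower t.toList) with htermsdef
  set R := pvOuter low terms (List.range low.length) terms.length with hRdef
  have hAlt : contains_banned_content_alt text banlist =
      (if h : R < banlist.length then (true, some (pvMsg (banlist[R]'h))) else (false, none)) := rfl
  have hlenT : terms.length = banlist.length := by rw [htermsdef]; exact List.length_map ..
  by_cases hE : text.toList = []
  · -- empty text: A takes the early return; B's outer loop runs zero times
    have hlow : low = [] := by rw [hlowdef, hE]; rfl
    have hRval : R = terms.length := by rw [hRdef, hlow]; simp [pvOuter]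
    have : ¬ R < banlist.length := by omega
    rw [hAlt, dif_neg this]
    simp [contains_banned_content, hE]
  · -- nonempty text
    have hA : contains_banned_content text banlist = pvALoop low banlist := by
      simp [contains_banned_content, hE, hlowdef]
    have hlow_ne : low ≠ [] := by
      rw [hlowdef]
      intro hc
      exact hE (by simpa [PySem.Chars.lower, List.map_eq_nil_iff] using hc)
    -- occurrence of term j  ↔  a position of the text matches it
    have hbridge : ∀ j, (hj : j < banlist.length) →
        (PySem.Chars.isIn (PySem.Chars.lower banlist[j].toList) low = true ↔
          ∃ i ∈ List.range low.length, pvMatchAt low terms i j = true) := by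
      intro j hj
      rw [pvIsIn_iff _ _ hlow_ne]
      constructor
      · rintro ⟨i, hi, hm⟩
        exact ⟨i, List.mem_range.2 hi, by rw [htermsdef, pvMatchAt_eq low banlist i j hj]; exact hm⟩
      · rintro ⟨i, hi, hm⟩
        rw [htermsdef, pvMatchAt_eq low banlist i j hj] at hm
        exact ⟨i, List.mem_range.1 hi, hm⟩
    obtain ⟨o1, o2, o3⟩ := pvOuter_invariant low terms (List.range low.length) terms.length
    rw [← hRdef] at o1 o2 o3
    by_cases hRL : R < banlist.length
    · -- some term occurs; R is the least banlist index that does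
      have hocc : PySem.Chars.isIn (PySem.Chars.lower banlist[R].toList) low = true := by
        rw [hbridge R hRL]
        exact o2 (by omega)
      have hmin : ∀ k, (hk : k < R) → PySem.Chars.isIn (PySem.Chars.lower (banlist[k]'(by omega)).toList) low = false := by
        intro k hk
        by_contra hc
        rw [Bool.not_eq_false] at hc
        have hkT := hc
        obtain ⟨i, hi, hm⟩ := (hbridge k (by omega)).1 hkT
        rw [o3 k hk i hi] at hm
        exact Bool.false_ne_true hm
      rw [hAlt, dif_pos hRL, hA]
      exact pvALoop_found low banlist R hRL hocc hmin
    · -- no term occurs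
      have hRval : R = banlist.length := by omega
      have hnone : ∀ t ∈ banlist, PySem.Chars.isIn (PySem.Chars.lower t.toList) low = false := by
        intro t ht
        obtain ⟨j, hj, rfl⟩ := List.mem_iff_getElem.1 ht
        by_contra hc
        rw [Bool.not_eq_false] at hc
        have hT := hc
        obtain ⟨i, hi, hm⟩ := (hbridge j hj).1 hT
        rw [o3 j (by omega) i hi] at hm
        exact Bool.false_ne_true hm
      rw [hAlt, dif_neg hRL, hA]
      exact pvALoop_none low banlist hnone

theorem contains_banned_content_spec : Claim_equal_contains_banned_content := by
  intro text banlist _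
  unfold Spec_contains_banned_content
  exact pvMain text banlist
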